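-- pv_equiv track=rewrite | github.com/Enjef/Algo | 1800 - 1899/1880 - Check if Word Equals Summation of Two Words/1880 - Check if Word Equals Summation of Two Words.py | isSumEqual_1
-- ===== SOURCE A (Python) =====
-- def isSumEqual_1(firstWord: str, secondWord: str, targetWord: str) -> bool:
--     letter = {
--         "a": 0, "b": 1, "c": 2, "d": 3, "e": 4, "f": 5, "g": 6,
--         "h": 7, "i": 8, "j": 9
--     }
--     words = {f'{firstWord}': 0, f'{secondWord}': 0, f'{targetWord}': 0}
--     for item in words:
--         for char in item:
--             words[item] *= 10
--             words[item] += letter[char]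
--     return(words[
--         f'{firstWord}'] + words[f'{secondWord}'] == words[f'{targetWord}'])
-- ===== SOURCE B (Python) =====
-- def isSumEqual_1(firstWord: str, secondWord: str, targetWord: str) -> bool:
--     letter = {
--         "a": 0, "b": 1, "c": 2, "d": 3, "e": 4, "f": 5, "g": 6,
--         "h": 7, "i": 8, "j": 9
--     }
--
--     def digits(w):
--         # least-significant-digit-first digit list of the encoded word
--         return [letter[c] for c in reversed(w)]
--
--     def add(xs, ys):
--         # grade-school ripple-carry addition of LSB-first digit lists
--         n = max(len(xs), len(ys))
--         xs = xs + [0] * (n - len(xs))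
--         ys = ys + [0] * (n - len(ys))
--         out = []
--         carry = 0
--         for x, y in zip(xs, ys):
--             s = x + y + carry
--             out.append(s % 10)
--             carry = s // 10
--         if carry:
--             out.append(carry)
--         return out
--
--     def strip(ds):
--         # drop leading zeros of the number = trailing zeros of the LSB-first list
--         while ds and ds[-1] == 0:
--             ds.pop()
--         return ds
--
--     return strip(add(digits(firstWord), digits(secondWord))) == strip(digits(targetWord))
-- ===== Notes on version B (the rewrite author's own statement) =====
-- stated objective: faster
-- what changed: Replaces A's big-integer arithmetic (dict-keyed Horner accumulation of each word into an int, then int addition) with grade-school digit-list arithmetic: map each word to an LSB-first digit list, add the two lists by a single ripple-carry pass, strip leading zeros and compare the digit lists for equality — no multi-digit integers are ever formed.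
import Mathlib
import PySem

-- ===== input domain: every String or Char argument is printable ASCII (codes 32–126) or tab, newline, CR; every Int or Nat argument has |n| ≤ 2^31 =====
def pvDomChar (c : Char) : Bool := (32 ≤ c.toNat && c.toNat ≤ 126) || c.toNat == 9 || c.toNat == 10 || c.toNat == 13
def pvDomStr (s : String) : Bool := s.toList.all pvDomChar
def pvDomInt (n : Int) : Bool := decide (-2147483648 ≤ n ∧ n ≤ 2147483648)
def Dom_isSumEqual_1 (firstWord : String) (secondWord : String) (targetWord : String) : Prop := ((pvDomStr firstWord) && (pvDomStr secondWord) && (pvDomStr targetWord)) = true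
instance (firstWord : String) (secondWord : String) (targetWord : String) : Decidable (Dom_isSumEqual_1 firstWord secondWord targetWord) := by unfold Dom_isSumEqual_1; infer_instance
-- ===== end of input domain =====

-- B replaces A's big-integer arithmetic (Horner accumulation into ints, then int addition)
-- by grade-school digit-list arithmetic: LSB-first digit lists, one ripple-carry pass,
-- strip leading zeros, compare lists; objective: faster (B only mutates its own local lists).

-- ===== PORT A =====
-- the `letter` dict (shared by both ports, as in the Python sources)
def pvLetter : PySem.Dict Char Int :=
  PySem.Dict.ofList [('a', 0), ('b', 1), ('c', 2), ('d', 3), ('e', 4),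
                     ('f', 5), ('g', 6), ('h', 7), ('i', 8), ('j', 9)]

def isSumEqual_1 (firstWord : String) (secondWord : String) (targetWord : String) : Bool :=
  let words0 : PySem.Dict String Int :=
    ((PySem.Dict.empty.insert firstWord 0).insert secondWord 0).insert targetWord 0
  -- for item in words: for char in item: words[item] *= 10; words[item] += letter[char]
  let words : PySem.Dict String Int :=
    words0.keys.foldl (fun d item =>
      item.toList.foldl (fun d' c =>
        (d'.modify item 0 (· * 10)).modify item 0 (· + pvLetter.getD c 0)) d) words0
  decide (words.getD firstWord 0 + words.getD secondWord 0 = words.getD targetWord 0)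

-- ===== PORT B =====
-- digits(w) = [letter[c] for c in reversed(w)]  (LSB-first digit list)
def pvDigits (w : String) : List Int :=
  w.toList.reverse.map (fun c => pvLetter.getD c 0)

-- add(xs, ys): pad to equal length, one ripple-carry pass over the zipped lists,
-- then append the leftover carry if nonzero
def pvAdd (xs ys : List Int) : List Int :=
  let n := max xs.length ys.length
  let xs' := xs ++ List.replicate (n - xs.length) 0
  let ys' := ys ++ List.replicate (n - ys.length) 0
  let oc : List Int × Int := (xs'.zip ys').foldl
    (fun oc p => (oc.1 ++ [PySem.Int.mod (p.1 + p.2 + oc.2) 10],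
                  PySem.Int.floordiv (p.1 + p.2 + oc.2) 10)) (([] : List Int), (0 : Int))
  if oc.2 ≠ 0 then oc.1 ++ [oc.2] else oc.1

-- strip(ds): `while ds and ds[-1] == 0: ds.pop()` — drop trailing zeros of the LSB-first list
def pvStrip (ds : List Int) : List Int :=
  if h : ds.getLast? = some 0 then pvStrip ds.dropLast else ds
  termination_by ds.length
  decreasing_by
    have hne : ds ≠ [] := by intro he; simp [he] at h
    have hpos := List.length_pos_of_ne_nil hne
    simp only [List.length_dropLast]; omega

def isSumEqual_1_alt (firstWord : String) (secondWord : String) (targetWord : String) : Bool :=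
  decide (pvStrip (pvAdd (pvDigits firstWord) (pvDigits secondWord)) =
          pvStrip (pvDigits targetWord))

-- ===== PRECONDITION & SPEC =====
-- Pre_ excludes words containing any character outside 'a'..'j': there both Pythons raise KeyError.
def Pre_isSumEqual_1 (firstWord : String) (secondWord : String) (targetWord : String) : Prop :=
  ((firstWord.toList ++ secondWord.toList ++ targetWord.toList).all
    (fun c => 'a' ≤ c && c ≤ 'j')) = true
instance (firstWord : String) (secondWord : String) (targetWord : String) : Decidable (Pre_isSumEqual_1 firstWord secondWord targetWord) := by unfold Pre_isSumEqual_1; infer_instance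

def pvWitness_isSumEqual_1 : String × String × String := ("acb", "cba", "cdb")

def Spec_isSumEqual_1 (firstWord : String) (secondWord : String) (targetWord : String) (out : Bool) : Prop := out = isSumEqual_1_alt firstWord secondWord targetWord
instance (firstWord : String) (secondWord : String) (targetWord : String) (out : Bool) : Decidable (Spec_isSumEqual_1 firstWord secondWord targetWord out) := by unfold Spec_isSumEqual_1; infer_instance

-- ===== CLAIM (what is proved, stated in full; the proofs are below) =====
def Claim_equal_isSumEqual_1 : Prop := ∀ (firstWord : String) (secondWord : String) (targetWord : String), Dom_isSumEqual_1 firstWord secondWord targetWord → Pre_isSumEqual_1 firstWord secondWord targetWord → Spec_isSumEqual_1 firstWord secondWord targetWord (isSumEqual_1 firstWord secondWord targetWord)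

-- ===== LEMMAS AND PROOFS =====

-- ---------- A side: the dict loop computes Horner per word ----------

-- A's per-character step, Horner-style, as a plain function on Int
def pvHorner (cs : List Char) (acc : Int) : Int :=
  cs.foldl (fun v c => v * 10 + pvLetter.getD c 0) acc

-- the inner `for char in item` loop only touches key `item`, and performs Horner on it
lemma pvInner_getD (item : String) (cs : List Char) (d : PySem.Dict String Int) (w : String) :
    (cs.foldl (fun d' c =>
        (d'.modify item 0 (· * 10)).modify item 0 (· + pvLetter.getD c 0)) d).getD w 0 =
      if w = item then pvHorner cs (d.getD item 0) else d.getD w 0 := by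
  induction cs generalizing d with
  | nil => by_cases h : w = item <;> simp [pvHorner, h]
  | cons c cs ih =>
      rw [List.foldl_cons, ih]
      by_cases h : w = item
      · subst h
        simp [pvHorner, PySem.Dict.getD_modify_self]
      · rw [if_neg h, if_neg h,
            PySem.Dict.getD_modify_of_ne _ _ _ h, PySem.Dict.getD_modify_of_ne _ _ _ h]

-- the outer loop over nodup keys: each key present gets the Horner value of its start value
lemma pvOuter_getD (ks : List String) (d : PySem.Dict String Int) (w : String)
    (hnd : ks.Nodup) :
    (ks.foldl (fun d item =>
        item.toList.foldl (fun d' c =>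
          (d'.modify item 0 (· * 10)).modify item 0 (· + pvLetter.getD c 0)) d) d).getD w 0 =
      if w ∈ ks then pvHorner w.toList (d.getD w 0) else d.getD w 0 := by
  induction ks generalizing d with
  | nil => simp
  | cons k ks ih =>
      rw [List.foldl_cons, ih _ (List.Nodup.of_cons hnd)]
      by_cases hw : w ∈ ks
      · have hwk : w ≠ k := fun h => (List.nodup_cons.mp hnd).1 (h ▸ hw)
        rw [if_pos hw, if_pos (List.mem_cons_of_mem _ hw), pvInner_getD, if_neg hwk]
      · by_cases hk : w = k
        · subst hk
          rw [if_neg hw, if_pos (List.mem_cons_self ..), pvInner_getD, if_pos rfl]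
        · rw [if_neg hw, if_neg (by simp [hk, hw]), pvInner_getD, if_neg hk]

-- Horner with any start value splits off the start times 10^length
lemma pvHorner_shift (cs : List Char) (acc : Int) :
    pvHorner cs acc = acc * 10 ^ cs.length + pvHorner cs 0 := by
  induction cs generalizing acc with
  | nil => simp [pvHorner]
  | cons c cs ih =>
      simp only [pvHorner, List.foldl_cons] at ih ⊢
      rw [ih (acc * 10 + pvLetter.getD c 0), ih (0 * 10 + pvLetter.getD c 0),
        List.length_cons, pow_succ]
      ring

-- the initial dict maps everything to 0
lemma pvWords0_getD (f s t : String) (u : String) :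
    (((PySem.Dict.empty.insert f 0).insert s 0).insert t (0 : Int)).getD u 0 = 0 := by
  simp only [PySem.Dict.getD_insert]
  split_ifs <;> simp [PySem.Dict.getD_empty]

lemma pvWords0_keys_nodup (f s t : String) :
    (((PySem.Dict.empty.insert f 0).insert s 0).insert t (0 : Int)).keys.Nodup := by
  apply PySem.Dict.nodup_keys_insert
  apply PySem.Dict.nodup_keys_insert
  apply PySem.Dict.nodup_keys_insert
  exact PySem.Dict.nodup_keys_empty

lemma pvWords0_mem_keys (f s t : String) (u : String) (h : u = f ∨ u = s ∨ u = t) :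
    u ∈ (((PySem.Dict.empty.insert f 0).insert s 0).insert t (0 : Int)).keys := by
  rcases h with h | h | h <;> subst h <;>
    simp [PySem.Dict.mem_keys_insert]

lemma pvFinal_getD (f s t : String) (u : String) (h : u = f ∨ u = s ∨ u = t) :
    ((((PySem.Dict.empty.insert f 0).insert s 0).insert t (0 : Int)).keys.foldl
      (fun d item =>
        item.toList.foldl (fun d' c =>
          (d'.modify item 0 (· * 10)).modify item 0 (· + pvLetter.getD c 0)) d)
      (((PySem.Dict.empty.insert f 0).insert s 0).insert t 0)).getD u 0 =
      pvHorner u.toList 0 := by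
  rw [pvOuter_getD _ _ _ (pvWords0_keys_nodup f s t)]
  rw [if_pos (pvWords0_mem_keys f s t u h), pvWords0_getD]

-- ---------- B side: digit lists ----------

-- value of an LSB-first digit list
def pvValL (ds : List Int) : Int := ds.foldr (fun d a => d + 10 * a) 0

lemma pvValL_nil : pvValL [] = 0 := rfl

lemma pvValL_cons (d : Int) (ds : List Int) : pvValL (d :: ds) = d + 10 * pvValL ds := rfl

-- all entries are decimal digits
def pvAllDig (ds : List Int) : Prop := ∀ d ∈ ds, 0 ≤ d ∧ d < 10

-- every lookup in the letter dict (including the port's default) is a digit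
lemma pvLetter_getD_digit (c : Char) : 0 ≤ pvLetter.getD c 0 ∧ pvLetter.getD c 0 < 10 := by
  have hitems : pvLetter.items = [('a', 0), ('b', 1), ('c', 2), ('d', 3), ('e', 4),
      ('f', 5), ('g', 6), ('h', 7), ('i', 8), ('j', 9)] := by decide
  simp only [PySem.Dict.getD, PySem.Dict.get?, hitems]
  rcases h : List.find? (fun p => p.1 == c) [('a', (0:Int)), ('b', 1), ('c', 2), ('d', 3), ('e', 4),
      ('f', 5), ('g', 6), ('h', 7), ('i', 8), ('j', 9)] with _ | p
  · simp [h]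
  · have hm := List.mem_of_find?_eq_some h
    simp only [List.mem_cons, List.not_mem_nil, or_false] at hm
    rcases hm with hp|hp|hp|hp|hp|hp|hp|hp|hp|hp <;> subst hp <;> simp [h]

lemma pvAllDig_digits (w : String) : pvAllDig (pvDigits w) := by
  intro d hd
  simp only [pvDigits, List.mem_map] at hd
  obtain ⟨c, -, rfl⟩ := hd
  exact pvLetter_getD_digit c

-- the ripple-carry fold, in recursive form (proof-side helper)
def pvRipple : List (Int × Int) → Int → List Int × Int
  | [], c => ([], c)
  | p :: ps, c =>
      let q := pvRipple ps (PySem.Int.floordiv (p.1 + p.2 + c) 10)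
      (PySem.Int.mod (p.1 + p.2 + c) 10 :: q.1, q.2)

-- the fold in pvAdd accumulates exactly pvRipple's output
lemma pvFold_eq_ripple (ps : List (Int × Int)) : ∀ (out : List Int) (c : Int),
    ps.foldl (fun oc p => (oc.1 ++ [PySem.Int.mod (p.1 + p.2 + oc.2) 10],
        PySem.Int.floordiv (p.1 + p.2 + oc.2) 10)) (out, c) =
      (out ++ (pvRipple ps c).1, (pvRipple ps c).2) := by
  induction ps with
  | nil => intro out c; simp [pvRipple]
  | cons p ps ih =>
      intro out c
      rw [List.foldl_cons, ih]
      simp [pvRipple, List.append_assoc]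

-- ripple-carry preserves the value (carry weighted by 10^length)
lemma pvRipple_val (ps : List (Int × Int)) : ∀ c : Int,
    pvValL ((pvRipple ps c).1) + (pvRipple ps c).2 * 10 ^ ps.length =
      pvValL (ps.map (·.1)) + pvValL (ps.map (·.2)) + c := by
  induction ps with
  | nil => intro c; simp [pvRipple, pvValL_nil]
  | cons p ps ih =>
      intro c
      have h := PySem.Int.floordiv_mul_add_mod (p.1 + p.2 + c) 10
      have ihc := ih (PySem.Int.floordiv (p.1 + p.2 + c) 10)
      simp only [pvRipple, List.map_cons, pvValL_cons, List.length_cons, pow_succ]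
      linear_combination 10 * ihc + h

-- ripple-carry on digit pairs with carry in [0,1] yields digits and a carry in [0,1]
lemma pvRipple_digits (ps : List (Int × Int))
    (hp : ∀ p ∈ ps, (0 ≤ p.1 ∧ p.1 < 10) ∧ (0 ≤ p.2 ∧ p.2 < 10)) : ∀ c : Int, 0 ≤ c → c ≤ 1 →
    pvAllDig ((pvRipple ps c).1) ∧ 0 ≤ (pvRipple ps c).2 ∧ (pvRipple ps c).2 ≤ 1 := by
  induction ps with
  | nil => intro c h0 h1; exact ⟨fun d hd => by simp [pvRipple] at hd, h0, h1⟩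
  | cons p ps ih =>
      intro c h0 h1
      have hp0 := hp p (List.mem_cons_self ..)
      have hc0 : (0:Int) ≤ PySem.Int.floordiv (p.1 + p.2 + c) 10 := by
        rw [PySem.Int.floordiv_eq_ediv_of_pos (by norm_num)]; omega
      have hc1 : PySem.Int.floordiv (p.1 + p.2 + c) 10 ≤ 1 := by
        rw [PySem.Int.floordiv_eq_ediv_of_pos (by norm_num)]; omega
      obtain ⟨hq, hq0, hq1⟩ := ih (fun q hq => hp q (List.mem_cons_of_mem _ hq)) _ hc0 hc1
      refine ⟨fun d hd => ?_, hq0, hq1⟩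
      rcases List.mem_cons.mp hd with rfl | hd
      · exact ⟨PySem.Int.mod_nonneg _ (by norm_num), PySem.Int.mod_lt _ (by norm_num)⟩
      · exact hq d hd

-- padding with zeros changes neither the value …
lemma pvValL_append_replicate_zero (xs : List Int) (k : Nat) :
    pvValL (xs ++ List.replicate k 0) = pvValL xs := by
  induction xs with
  | nil =>
      simp only [List.nil_append]
      induction k with
      | zero => rfl
      | succ k ih => rw [List.replicate_succ, pvValL_cons, ih, pvValL_nil]; ring
  | cons a t ih => rw [List.cons_append, pvValL_cons, ih, pvValL_cons]

-- … nor digit-ness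
lemma pvAllDig_append_replicate_zero (xs : List Int) (k : Nat) (h : pvAllDig xs) :
    pvAllDig (xs ++ List.replicate k 0) := by
  intro d hd
  rcases List.mem_append.mp hd with hd | hd
  · exact h d hd
  · rw [List.eq_of_mem_replicate hd]; norm_num

-- ripple-carry output has one digit per pair
lemma pvRipple_length (ps : List (Int × Int)) : ∀ c : Int,
    (pvRipple ps c).1.length = ps.length := by
  induction ps with
  | nil => intro c; rfl
  | cons p ps ih => intro c; simp [pvRipple, ih]

-- appending a most-significant digit
lemma pvValL_append_singleton (xs : List Int) (d : Int) :
    pvValL (xs ++ [d]) = pvValL xs + d * 10 ^ xs.length := by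
  induction xs with
  | nil => simp [pvValL_cons, pvValL_nil]
  | cons a t ih =>
      rw [List.cons_append, pvValL_cons, ih, pvValL_cons, List.length_cons, pow_succ]
      ring

-- pvAdd preserves the value
lemma pvValL_add (xs ys : List Int) : pvValL (pvAdd xs ys) = pvValL xs + pvValL ys := by
  set xs' := xs ++ List.replicate (max xs.length ys.length - xs.length) (0:Int) with hxs'
  set ys' := ys ++ List.replicate (max xs.length ys.length - ys.length) (0:Int) with hys'
  have hlx : xs'.length = max xs.length ys.length := by
    rw [hxs', List.length_append, List.length_replicate]; omega
  have hly : ys'.length = max xs.length ys.length := by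
    rw [hys', List.length_append, List.length_replicate]; omega
  have hlen : xs'.length = ys'.length := by rw [hlx, hly]
  have hfst : (xs'.zip ys').map (fun p => p.1) = xs' := by
    simpa using List.map_fst_zip (le_of_eq hlen)
  have hsnd : (xs'.zip ys').map (fun p => p.2) = ys' := by
    simpa using List.map_snd_zip (le_of_eq hlen.symm)
  have hvx : pvValL xs' = pvValL xs := by rw [hxs', pvValL_append_replicate_zero]
  have hvy : pvValL ys' = pvValL ys := by rw [hys', pvValL_append_replicate_zero]
  have hval := pvRipple_val (xs'.zip ys') 0
  rw [hfst, hsnd, hvx, hvy, add_zero] at hval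
  rw [pvAdd, ← hxs', ← hys', pvFold_eq_ripple, List.nil_append]
  split_ifs with hc
  · rw [pvValL_append_singleton, pvRipple_length]
    exact hval
  · rw [not_ne_iff] at hc
    rw [← hval, hc]; ring

-- pvAdd of digit lists is a digit list
lemma pvAllDig_add (xs ys : List Int) (hx : pvAllDig xs) (hy : pvAllDig ys) :
    pvAllDig (pvAdd xs ys) := by
  set xs' := xs ++ List.replicate (max xs.length ys.length - xs.length) (0:Int) with hxs'
  set ys' := ys ++ List.replicate (max xs.length ys.length - ys.length) (0:Int) with hys'
  have hx' : pvAllDig xs' := by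
    rw [hxs']; exact pvAllDig_append_replicate_zero xs _ hx
  have hy' : pvAllDig ys' := by
    rw [hys']; exact pvAllDig_append_replicate_zero ys _ hy
  have hp : ∀ p ∈ xs'.zip ys', ((0:Int) ≤ p.1 ∧ p.1 < 10) ∧ ((0:Int) ≤ p.2 ∧ p.2 < 10) := by
    intro p hpm
    exact ⟨hx' p.1 ((List.of_mem_zip hpm).1), hy' p.2 ((List.of_mem_zip hpm).2)⟩
  obtain ⟨hq, hq0, hq1⟩ := pvRipple_digits (xs'.zip ys') hp 0 le_rfl zero_le_one
  rw [pvAdd, ← hxs', ← hys', pvFold_eq_ripple, List.nil_append]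
  split_ifs with hc
  · intro d hd
    rcases List.mem_append.mp hd with hd | hd
    · exact hq d hd
    · rw [List.mem_singleton] at hd; subst hd; omega
  · exact hq

-- strip preserves the value
lemma pvValL_strip (ds : List Int) : pvValL (pvStrip ds) = pvValL ds := by
  fun_induction pvStrip ds with
  | case1 ds h ih =>
      rw [ih]
      have hne : ds ≠ [] := by intro he; simp [he] at h
      conv_rhs => rw [← List.dropLast_concat_getLast hne]
      rw [List.getLast?_eq_some_getLast hne] at h
      have h0 : ds.getLast hne = 0 := by injection h
      rw [h0]
      induction ds.dropLast with
      | nil => simp [pvValL]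
      | cons a t iht => simp only [List.cons_append, pvValL_cons, iht]
  | case2 ds h => rfl

-- strip preserves digit-ness
lemma pvAllDig_strip (ds : List Int) (h : pvAllDig ds) : pvAllDig (pvStrip ds) := by
  fun_induction pvStrip ds with
  | case1 ds _ ih =>
      exact fun d hd => ih (fun d hd => h d (List.dropLast_sublist ds |>.mem hd)) d hd
  | case2 ds _ => exact h

-- strip leaves no trailing zero
lemma pvStrip_getLast? (ds : List Int) : (pvStrip ds).getLast? ≠ some 0 := by
  fun_induction pvStrip ds with
  | case1 ds h ih => exact ih
  | case2 ds h => exact h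

-- digit lists have nonnegative value
lemma pvValL_nonneg (ds : List Int) (h : pvAllDig ds) : 0 ≤ pvValL ds := by
  induction ds with
  | nil => simp [pvValL_nil]
  | cons d t ih =>
      have hd := h d (List.mem_cons_self ..)
      have ht := ih (fun d hd => h d (List.mem_cons_of_mem _ hd))
      rw [pvValL_cons]; omega

-- a zero-valued stripped digit list is empty
lemma pvValL_eq_zero (ds : List Int) (h : pvAllDig ds) (hl : ds.getLast? ≠ some 0)
    (hv : pvValL ds = 0) : ds = [] := by
  induction ds with
  | nil => rfl
  | cons d t ih =>
      have hd := h d (List.mem_cons_self ..)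
      have htn := pvValL_nonneg t (fun d hd => h d (List.mem_cons_of_mem _ hd))
      rw [pvValL_cons] at hv
      have hd0 : d = 0 ∧ pvValL t = 0 := by omega
      cases t with
      | nil => exfalso; apply hl; simp [hd0.1]
      | cons a t' =>
          have : (a :: t') = [] := by
            apply ih (fun d hd => h d (List.mem_cons_of_mem _ hd)) _ hd0.2
            rwa [List.getLast?_cons_cons] at hl
          exact absurd this (by simp)

-- a nonzero last entry survives dropping the head
lemma pvLast?_tail (x : Int) (xt : List Int) (h : (x :: xt).getLast? ≠ some 0) :
    xt.getLast? ≠ some 0 := by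
  cases xt with
  | nil => simp
  | cons a t => rwa [List.getLast?_cons_cons] at h

-- canonicity: stripped digit lists with equal values are equal
lemma pvCanon (xs : List Int) : ∀ ys : List Int, pvAllDig xs → pvAllDig ys →
    xs.getLast? ≠ some 0 → ys.getLast? ≠ some 0 → pvValL xs = pvValL ys → xs = ys := by
  induction xs with
  | nil =>
      intro ys _ hy _ hly hv
      exact (pvValL_eq_zero ys hy hly (by rw [← hv]; rfl)).symm
  | cons x xt ih =>
      intro ys hx hy hlx hly hv
      cases ys with
      | nil => exact absurd (pvValL_eq_zero _ hx hlx (by rw [hv]; rfl)) (by simp)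
      | cons y yt =>
          have hxd := hx x (List.mem_cons_self ..)
          have hyd := hy y (List.mem_cons_self ..)
          have hxt : pvAllDig xt := fun d hd => hx d (List.mem_cons_of_mem _ hd)
          have hyt : pvAllDig yt := fun d hd => hy d (List.mem_cons_of_mem _ hd)
          have hxn := pvValL_nonneg xt hxt
          have hyn := pvValL_nonneg yt hyt
          rw [pvValL_cons, pvValL_cons] at hv
          have hxy : x = y ∧ pvValL xt = pvValL yt := by omega
          have := ih yt hxt hyt (pvLast?_tail _ _ hlx) (pvLast?_tail _ _ hly) hxy.2
          rw [hxy.1, this]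

-- the digit list of a word has the word's Horner value
lemma pvValL_rev_map (cs : List Char) :
    pvValL (cs.reverse.map (fun c => pvLetter.getD c 0)) = pvHorner cs 0 := by
  induction cs with
  | nil => rfl
  | cons c cs ih =>
      rw [List.reverse_cons, List.map_append, List.map_cons, List.map_nil,
        pvValL_append_singleton, ih, List.length_map, List.length_reverse]
      have h := pvHorner_shift cs (0 * 10 + pvLetter.getD c 0)
      simp only [pvHorner, List.foldl_cons] at h ⊢
      rw [h]; ring

lemma pvValL_digits (w : String) : pvValL (pvDigits w) = pvHorner w.toList 0 := by
  rw [pvDigits, pvValL_rev_map]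

-- ===== VERDICT (by name: the statement is the Claim_ definition above) =====
theorem isSumEqual_1_spec : Claim_equal_isSumEqual_1 := by
  intro f s t _ _
  show isSumEqual_1 f s t = isSumEqual_1_alt f s t
  rw [isSumEqual_1, isSumEqual_1_alt]
  rw [pvFinal_getD f s t f (Or.inl rfl), pvFinal_getD f s t s (Or.inr (Or.inl rfl)),
      pvFinal_getD f s t t (Or.inr (Or.inr rfl))]
  have key : (pvHorner f.toList 0 + pvHorner s.toList 0 = pvHorner t.toList 0) ↔
      (pvStrip (pvAdd (pvDigits f) (pvDigits s)) = pvStrip (pvDigits t)) := by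
    constructor
    · intro hv
      apply pvCanon
      · exact pvAllDig_strip _ (pvAllDig_add _ _ (pvAllDig_digits f) (pvAllDig_digits s))
      · exact pvAllDig_strip _ (pvAllDig_digits t)
      · exact pvStrip_getLast? _
      · exact pvStrip_getLast? _
      · rw [pvValL_strip, pvValL_strip, pvValL_add, pvValL_digits, pvValL_digits,
          pvValL_digits, hv]
    · intro hl
      have := congrArg pvValL hl
      rw [pvValL_strip, pvValL_strip, pvValL_add, pvValL_digits, pvValL_digits,
        pvValL_digits] at this
      exact this
  simp [key]
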